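-- pv_equiv track=rewrite | github.com/ahmzan/KotakodeCodingFestival2.0 | Python/level1.hurufBergantian.py | hurufBergantian
-- ===== SOURCE A (Python) =====
-- def hurufBergantian(inputString):
--     # mendefinisikan variabel
--     output = 0
--     newString = ''
--     # melakukan perulangan sebanyak panjang inputString
--     for i in range(len(inputString)):
--         # menggunakan try except
--         try:
--             # jika inputString sekarang sama dengan inputString selanjutnya
--             if inputString[i] == inputString[i + 1]:
--                 # output ditambah 1
--                 output += 1
--             else:
--                 # jika tidak sama masukan karakter sekarang ke newString
--                 newString += inputString[i]
--         # jika terjadi error artinya telah mencapai akhir array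
--         except:
--             # memasukan karakter sekarang ke newString
--             newString += inputString[i]
--     return output
-- ===== SOURCE B (Python) =====
-- def hurufBergantian(inputString):
--     # Divide and conquer: split the string at the middle, count equal-neighbour
--     # positions in each half recursively, and add 1 if the pair straddling the
--     # split point is equal.  Correct because every adjacent pair lies entirely
--     # in the left half, entirely in the right half, or across the boundary.
--     n = len(inputString)
--     if n < 2:
--         return 0
--     mid = n // 2
--     left = inputString[:mid]
--     right = inputString[mid:]
--     return (hurufBergantian(left) + hurufBergantian(right)
--             + (1 if left[-1] == right[0] else 0))
-- ===== Notes on version B (the rewrite author's own statement) =====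
-- stated objective: alternative
-- what changed: B counts equal-neighbour positions by divide and conquer: it splits the string at the midpoint, recurses on both halves, and adds one boundary comparison per split, instead of A's single linear index loop comparing s[i] with s[i+1] under try/except while building a dead newString.
import Mathlib
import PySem

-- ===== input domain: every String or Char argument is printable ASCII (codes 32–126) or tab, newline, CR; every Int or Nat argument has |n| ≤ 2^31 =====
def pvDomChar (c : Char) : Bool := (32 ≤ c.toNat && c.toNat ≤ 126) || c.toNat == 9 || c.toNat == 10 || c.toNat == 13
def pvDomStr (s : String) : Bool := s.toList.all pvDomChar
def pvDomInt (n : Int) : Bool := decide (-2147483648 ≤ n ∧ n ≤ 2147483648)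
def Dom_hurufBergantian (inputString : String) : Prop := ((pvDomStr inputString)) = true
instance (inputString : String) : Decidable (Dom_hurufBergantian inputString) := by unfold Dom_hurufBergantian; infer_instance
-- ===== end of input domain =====

-- B counts equal-neighbour positions by divide and conquer (split at the midpoint,
-- recurse on both halves, add one boundary comparison) instead of A's linear index
-- loop with a try/except boundary and a dead newString.

-- ===== PORT A =====
-- loop body of A: try: if s[i]==s[i+1]: output+=1 else: newString+=s[i]
-- except IndexError: newString += s[i].  State = (output, newString).
def stepA (cs : List Char) (st : Int × List Char) (i : Int) : Int × List Char :=
  match PySem.List.pyGet? cs (i + 1) with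
  | some c =>
    if PySem.List.pyGetD cs i ' ' == c then (st.1 + 1, st.2)
    else (st.1, st.2 ++ [PySem.List.pyGetD cs i ' '])
  | none => (st.1, st.2 ++ [PySem.List.pyGetD cs i ' '])

-- literal port of A: for i in range(len(s)): stepA; return output
def hurufBergantian (inputString : String) : Int :=
  let cs := inputString.toList
  ((PySem.List.pyRange 0 (cs.length : Int) 1).foldl (stepA cs) (0, [])).1

-- ===== PORT B =====
-- literal port of Source B's recursion, on the character list:
-- if n < 2: 0 else recurse on s[:mid] and s[mid:], plus (1 if left[-1]==right[0] else 0)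
def countB (s : List Char) : Int :=
  if s.length < 2 then 0
  else
    let mid := s.length / 2
    let left := PySem.List.slice s none (some (mid : Int))
    let right := PySem.List.slice s (some (mid : Int)) none
    countB left + countB right +
      (if PySem.List.pyGet? left (-1) == PySem.List.pyGet? right 0 then 1 else 0)
termination_by s.length
decreasing_by
  · simp only [PySem.List.slice_to_natCast, List.length_take]
    omega
  · simp only [PySem.List.slice_from_natCast, List.length_drop]
    omega

def hurufBergantian_alt (inputString : String) : Int :=
  countB inputString.toList

-- ===== PRECONDITION & SPEC =====
def Spec_hurufBergantian (inputString : String) (out : Int) : Prop := out = hurufBergantian_alt inputString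
instance (inputString : String) (out : Int) : Decidable (Spec_hurufBergantian inputString out) := by unfold Spec_hurufBergantian; infer_instance

-- ===== CLAIM =====
def Claim_equal_hurufBergantian : Prop := ∀ (inputString : String), Dom_hurufBergantian inputString → Spec_hurufBergantian inputString (hurufBergantian inputString)

-- ===== LEMMAS AND PROOFS =====

-- number of equal adjacent pairs, the common specification of both programs
def countAdj : List Char → Int
  | [] => 0
  | [_] => 0
  | a :: b :: t => (if a == b then 1 else 0) + countAdj (b :: t)

-- the per-index contribution of A's loop body to output
def indA (cs : List Char) (i : Int) : Int :=
  match PySem.List.pyGet? cs (i + 1) with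
  | some c => if PySem.List.pyGetD cs i ' ' == c then 1 else 0
  | none => 0

theorem stepA_fst (cs : List Char) (st : Int × List Char) (i : Int) :
    (stepA cs st i).1 = st.1 + indA cs i := by
  cases h : PySem.List.pyGet? cs (i + 1) with
  | none => simp [stepA, indA, h]
  | some c =>
    by_cases hc : PySem.List.pyGetD cs i ' ' == c
    · simp [stepA, indA, h, hc]
    · simp [stepA, indA, h, hc]

-- A's first state component ignores newString
theorem hurufA_proj (cs : List Char) (l : List Int) (st : Int × List Char) :
    (l.foldl (stepA cs) st).1 = l.foldl (fun o i => o + indA cs i) st.1 := by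
  induction l generalizing st with
  | nil => rfl
  | cons i l ih => rw [List.foldl_cons, List.foldl_cons, ih, stepA_fst]

theorem hurufA_tail (cs : List Char) (m : Nat) :
    ∀ (k : Nat) (o : Int), k + m = cs.length →
      (PySem.List.pyRange (k : Int) (cs.length : Int) 1).foldl
        (fun o i => o + indA cs i) o = o + countAdj (cs.drop k) := by
  induction m with
  | zero =>
    intro k o hk
    rw [PySem.List.pyRange_one_eq_nil (by omega)]
    simp [show k = cs.length by omega, countAdj]
  | succ m ih =>
    intro k o hk
    have hklt : k < cs.length := by omega
    rw [PySem.List.pyRange_one_cons (by exact_mod_cast hklt)]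
    rw [List.foldl_cons]
    rw [show ((k : Int) + 1) = ((k + 1 : Nat) : Int) from by push_cast; ring,
        ih (k + 1) (o + indA cs (k : Int)) (by omega)]
    have hdrop : cs.drop k = cs[k] :: cs.drop (k + 1) := List.drop_eq_getElem_cons hklt
    have hget : PySem.List.pyGet? cs ((k : Int) + 1) = (cs.drop (k + 1)).head? := by
      rw [show ((k : Int) + 1) = ((k + 1 : Nat) : Int) from by push_cast; ring,
          PySem.List.pyGet?_natCast, List.head?_drop]
    have hgetD : PySem.List.pyGetD cs (k : Int) ' ' = cs[k] := by
      simp [PySem.List.pyGetD_natCast, List.getD_eq_getElem?_getD, List.getElem?_eq_getElem hklt]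
    rw [hdrop]
    cases hd : cs.drop (k + 1) with
    | nil =>
      rw [hd] at hget
      simp only [indA, hget, List.head?_nil, countAdj]
      ring
    | cons b t =>
      rw [hd] at hget
      simp only [indA, hget, List.head?_cons, hgetD, countAdj]
      ring

-- A computes countAdj
theorem hurufA_eq (s : String) : hurufBergantian s = countAdj s.toList := by
  simp only [hurufBergantian]
  rw [hurufA_proj]
  have := hurufA_tail s.toList s.toList.length 0 0 (by omega)
  simpa using this

-- boundary contribution of a split
def bnd (xs ys : List Char) : Int :=
  match xs.getLast?, ys.head? with
  | some a, some b => if a == b then 1 else 0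
  | _, _ => 0

theorem countAdj_append (xs ys : List Char) :
    countAdj (xs ++ ys) = countAdj xs + countAdj ys + bnd xs ys := by
  induction xs with
  | nil => simp [countAdj, bnd]
  | cons a t ih =>
    cases t with
    | nil =>
      cases ys with
      | nil => simp [countAdj, bnd]
      | cons b u => simp [countAdj, bnd]; ring
    | cons c t' =>
      have : (a :: c :: t') ++ ys = a :: ((c :: t') ++ ys) := rfl
      rw [this]
      have hx : ((c :: t') ++ ys) = c :: (t' ++ ys) := rfl
      rw [show countAdj (a :: (c :: t' ++ ys)) =
            (if a == c then 1 else 0) + countAdj ((c :: t') ++ ys) from rfl]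
      rw [ih]
      have hb : bnd (a :: c :: t') ys = bnd (c :: t') ys := by
        simp [bnd, List.getLast?_cons_cons]
      rw [hb, show countAdj (a :: c :: t') = (if a == c then 1 else 0) + countAdj (c :: t') from rfl]
      ring

theorem countB_eq_aux : ∀ (n : Nat) (s : List Char), s.length ≤ n → countB s = countAdj s := by
  intro n
  induction n with
  | zero =>
    intro s hs
    have h0 : s = [] := List.eq_nil_of_length_eq_zero (by omega)
    subst h0
    rw [countB]; simp [countAdj]
  | succ n ih =>
    intro s hs
    by_cases hlt : s.length < 2
    · rw [countB, if_pos hlt]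
      match s, hlt with
      | [], _ => simp [countAdj]
      | [a], _ => simp [countAdj]
    · rw [countB, if_neg hlt]
      simp only [PySem.List.slice_to_natCast, PySem.List.slice_from_natCast]
      have hmid1 : 1 ≤ s.length / 2 := by omega
      have hmid2 : s.length / 2 < s.length := by omega
      have hlen_take : (s.take (s.length / 2)).length = s.length / 2 := by
        simp; omega
      have hlen_drop : (s.drop (s.length / 2)).length = s.length - s.length / 2 := by simp
      rw [ih _ (by omega), ih _ (by omega)]
      have hsplit : s = s.take (s.length / 2) ++ s.drop (s.length / 2) :=
        (List.take_append_drop _ s).symm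
      conv_rhs => rw [hsplit]
      rw [countAdj_append]
      have hlne : s.take (s.length / 2) ≠ [] := by
        intro h; rw [h] at hlen_take; simp at hlen_take; omega
      have hrne : s.drop (s.length / 2) ≠ [] := by
        intro h; rw [h] at hlen_drop; simp at hlen_drop; omega
      have ha : (s.take (s.length / 2)).getLast? = some ((s.take (s.length / 2)).getLast hlne) :=
        List.getLast?_eq_some_getLast hlne
      have hb : (s.drop (s.length / 2)).head? = some ((s.drop (s.length / 2)).head hrne) :=
        List.head?_eq_some_head hrne
      rw [show PySem.List.pyGet? (s.take (s.length / 2)) (-1) = (s.take (s.length / 2)).getLast?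
            from PySem.List.pyGet?_neg_one _]
      rw [show PySem.List.pyGet? (s.drop (s.length / 2)) 0 = (s.drop (s.length / 2)).head? by
            rw [PySem.List.pyGet?_zero, ← List.head?_eq_getElem?]]
      rw [ha, hb]
      simp only [bnd, ha, hb]
      by_cases hab : (s.take (s.length / 2)).getLast hlne == (s.drop (s.length / 2)).head hrne
      · simp [hab]
      · simp [hab]

theorem countB_eq (s : List Char) : countB s = countAdj s :=
  countB_eq_aux s.length s le_rfl

-- ===== VERDICT =====
theorem hurufBergantian_spec : Claim_equal_hurufBergantian := by
  intro s _
  unfold Spec_hurufBergantian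
  rw [hurufA_eq, hurufBergantian_alt, countB_eq]
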